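-- pv_equiv track=rewrite | github.com/thirtiseven/projecteuler | 026.py | zhi
-- ===== SOURCE A (Python) =====
-- def zhi(n):
-- 	if n==2 or n==5:
-- 		return True
-- 	if n%2==0:
-- 		return zhi(n//2)
-- 	if n%5==0:
-- 		return zhi(n//5)
-- 	return False
-- ===== SOURCE B (Python) =====
-- def zhi(n):
--     # strip all factors of 2, then all factors of 5; True iff nothing else remains
--     if n < 2:
--         return False
--     while n % 2 == 0:
--         n //= 2
--     while n % 5 == 0:
--         n //= 5
--     return n == 1
-- ===== Notes on version B (the rewrite author's own statement) =====
-- stated objective: alternative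
-- what changed: Replaced the mutually-reentrant branch recursion (base cases checked at every level) by an early range check, two factor-stripping while loops (all twos, then all fives) and a final test that no other factor remains.
-- outside the precondition, e.g. on zhi(0): A raises RecursionError, B returns False
import Mathlib
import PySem

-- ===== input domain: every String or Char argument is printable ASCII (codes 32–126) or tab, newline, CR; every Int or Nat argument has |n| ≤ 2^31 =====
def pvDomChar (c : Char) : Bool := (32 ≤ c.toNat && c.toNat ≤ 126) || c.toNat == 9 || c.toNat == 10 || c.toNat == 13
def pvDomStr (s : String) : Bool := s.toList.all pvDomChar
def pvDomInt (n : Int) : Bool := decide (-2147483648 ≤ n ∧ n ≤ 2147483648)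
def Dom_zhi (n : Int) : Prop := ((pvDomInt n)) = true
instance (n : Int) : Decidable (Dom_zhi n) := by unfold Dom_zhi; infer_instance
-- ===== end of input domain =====

-- B replaces A's branch recursion by a range check plus two factor-stripping loops (alternative decomposition, same cost); on n==0 A raises RecursionError, B returns False.


-- ===== PORT A =====
-- fuel = n.natAbs + 1 totalises the recursion; on Pre_ (n ≠ 0) it is never exhausted
def zhiF : Nat → Int → Bool
  | 0, _ => false
  | f+1, n =>
    if n = 2 ∨ n = 5 then true
    else if PySem.Int.mod n 2 = 0 then zhiF f (PySem.Int.floordiv n 2)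
    else if PySem.Int.mod n 5 = 0 then zhiF f (PySem.Int.floordiv n 5)
    else false

def zhi (n : Int) : Bool := zhiF (n.natAbs + 1) n

-- ===== PORT B =====
-- one while-loop 'while n % d == 0: n //= d', fuel-totalised (fuel suffices for every n reached)
def stripF (d : Int) : Nat → Int → Int
  | 0, n => n
  | f+1, n => if PySem.Int.mod n d = 0 then stripF d f (PySem.Int.floordiv n d) else n

def zhi_alt (n : Int) : Bool :=
  if n < 2 then false
  else
    let m := stripF 2 (n.natAbs + 1) n
    let k := stripF 5 (m.natAbs + 1) m
    decide (k = 1)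

-- ===== PRECONDITION & SPEC =====
-- Pre_ excludes only n = 0, where Python A never returns (RecursionError).
def Pre_zhi (n : Int) : Prop := n ≠ 0
instance (n : Int) : Decidable (Pre_zhi n) := by unfold Pre_zhi; infer_instance
def pvWitness_zhi : Int := 40

def Spec_zhi (n : Int) (out : Bool) : Prop := out = zhi_alt n
instance (n : Int) (out : Bool) : Decidable (Spec_zhi n out) := by unfold Spec_zhi; infer_instance

-- ===== CLAIM (what is proved, stated in full; the proofs are below) =====
def Claim_equal_zhi : Prop := ∀ (n : Int), Dom_zhi n → Pre_zhi n → Spec_zhi n (zhi n)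

-- ===== LEMMAS AND PROOFS =====

-- canonical strip with its own fuel
def stripC (d n : Int) : Int := stripF d (n.natAbs + 1) n

theorem stripF_zero (d : Int) (hd : 0 < d) : ∀ f, stripF d f 0 = 0 := by
  intro f
  induction f with
  | zero => rfl
  | succ f ih =>
    simp [stripF, PySem.Int.mod_eq_emod_of_pos hd, PySem.Int.floordiv_eq_ediv_of_pos hd, ih]

theorem natAbs_div_lt (d n : Int) (hd : 2 ≤ d) (hn : n ≠ 0) (hdvd : d ∣ n) :
    (n / d).natAbs < n.natAbs := by
  obtain ⟨k, rfl⟩ := hdvd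
  rw [Int.mul_ediv_cancel_left _ (by omega)]
  have hk : k ≠ 0 := by rintro rfl; simp at hn
  have := Int.natAbs_mul d k
  have h1 : 1 ≤ k.natAbs := by omega
  have h2 : 2 ≤ d.natAbs := by omega
  nlinarith [this]

theorem stripF_stable (d : Int) (hd : 2 ≤ d) :
    ∀ k n f g, n.natAbs ≤ k → n.natAbs ≤ f → n.natAbs ≤ g →
      stripF d (f + 1) n = stripF d (g + 1) n := by
  intro k
  induction k with
  | zero =>
    intro n f g hk _ _
    have : n = 0 := by omega
    subst this
    rw [stripF_zero d (by omega), stripF_zero d (by omega)]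
  | succ k ih =>
    intro n f g hk hf hg
    by_cases hmod : PySem.Int.mod n d = 0
    · by_cases hn0 : n = 0
      · subst hn0; rw [stripF_zero d (by omega), stripF_zero d (by omega)]
      · have hdvd : d ∣ n := by
          have := PySem.Int.mod_eq_emod_of_pos (a := n) (b := d) (by omega)
          rw [this] at hmod
          exact Int.dvd_of_emod_eq_zero hmod
        have hlt : (n / d).natAbs < n.natAbs :=
          natAbs_div_lt d n hd hn0 hdvd
        have hfd : PySem.Int.floordiv n d = n / d :=
          PySem.Int.floordiv_eq_ediv_of_pos (by omega)
        have h1 : 1 ≤ n.natAbs := by omega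
        obtain ⟨f', rfl⟩ : ∃ f', f = f' + 1 := ⟨f - 1, by omega⟩
        obtain ⟨g', rfl⟩ : ∃ g', g = g' + 1 := ⟨g - 1, by omega⟩
        rw [show stripF d (f' + 1 + 1) n
              = if PySem.Int.mod n d = 0 then stripF d (f' + 1) (PySem.Int.floordiv n d) else n
              from rfl,
            show stripF d (g' + 1 + 1) n
              = if PySem.Int.mod n d = 0 then stripF d (g' + 1) (PySem.Int.floordiv n d) else n
              from rfl,
            if_pos hmod, if_pos hmod, hfd]
        exact ih (n / d) f' g' (by omega) (by omega) (by omega)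
    · simp [stripF, hmod]

theorem stripC_step (d n : Int) (hd : 2 ≤ d) (hn : n ≠ 0) (hmod : PySem.Int.mod n d = 0) :
    stripC d n = stripC d (PySem.Int.floordiv n d) := by
  have hdvd : d ∣ n := by
    have := PySem.Int.mod_eq_emod_of_pos (a := n) (b := d) (by omega)
    rw [this] at hmod
    exact Int.dvd_of_emod_eq_zero hmod
  have hfd : PySem.Int.floordiv n d = n / d :=
    PySem.Int.floordiv_eq_ediv_of_pos (by omega)
  have hlt : (n / d).natAbs < n.natAbs := natAbs_div_lt d n hd hn hdvd
  have h1 : 1 ≤ n.natAbs := by omega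
  unfold stripC
  obtain ⟨t, ht⟩ : ∃ t, n.natAbs = t + 1 := ⟨n.natAbs - 1, by omega⟩
  rw [ht]
  rw [show stripF d (t + 1 + 1) n
        = if PySem.Int.mod n d = 0 then stripF d (t + 1) (PySem.Int.floordiv n d) else n
        from rfl,
      if_pos hmod, hfd]
  exact stripF_stable d hd (n / d).natAbs (n / d) t (n / d).natAbs le_rfl (by omega) le_rfl

theorem stripC_noop (d n : Int) (hmod : ¬ PySem.Int.mod n d = 0) : stripC d n = n := by
  unfold stripC
  simp [stripF, hmod]

theorem zhi_alt_eq (n : Int) :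
    zhi_alt n = if n < 2 then false else decide (stripC 5 (stripC 2 n) = 1) := rfl

theorem dvd_of_mod2 {n : Int} (h : PySem.Int.mod n 2 = 0) : 2 ∣ n := by
  have := PySem.Int.mod_eq_emod_of_pos (a := n) (b := 2) (by omega)
  rw [this] at h; exact Int.dvd_of_emod_eq_zero h

theorem dvd_of_mod5 {n : Int} (h : PySem.Int.mod n 5 = 0) : 5 ∣ n := by
  have := PySem.Int.mod_eq_emod_of_pos (a := n) (b := 5) (by omega)
  rw [this] at h; exact Int.dvd_of_emod_eq_zero h

-- R2: stepping by /2 keeps B's answer, for even n ∉ {0, 2}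
theorem alt_step2 (n : Int) (hn : n ≠ 0) (h2 : PySem.Int.mod n 2 = 0) (hne : n ≠ 2) :
    zhi_alt n = zhi_alt (PySem.Int.floordiv n 2) := by
  obtain ⟨k, rfl⟩ := dvd_of_mod2 h2
  have hfd : PySem.Int.floordiv (2 * k) 2 = k := by
    rw [PySem.Int.floordiv_eq_ediv_of_pos (by omega)]
    exact Int.mul_ediv_cancel_left _ (by omega)
  rw [hfd]
  by_cases hk : k < 1
  · rw [zhi_alt_eq, zhi_alt_eq, if_pos (by omega), if_pos (by omega)]
  · -- 2*k ≥ 4 and k ≥ 2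
    have hk2 : 2 ≤ k := by
      rcases lt_or_ge k 2 with h | h
      · interval_cases k <;> simp_all
      · exact h
    rw [zhi_alt_eq, zhi_alt_eq, if_neg (by omega), if_neg (by omega)]
    rw [stripC_step 2 (2 * k) (by omega) hn h2, hfd]

-- R3: stepping by /5 keeps B's answer, for odd multiples of 5 other than 5
theorem alt_step5 (n : Int) (hn : n ≠ 0) (h2 : ¬ PySem.Int.mod n 2 = 0)
    (h5 : PySem.Int.mod n 5 = 0) (hne : n ≠ 5) :
    zhi_alt n = zhi_alt (PySem.Int.floordiv n 5) := by
  obtain ⟨k, rfl⟩ := dvd_of_mod5 h5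
  have hfd : PySem.Int.floordiv (5 * k) 5 = k := by
    rw [PySem.Int.floordiv_eq_ediv_of_pos (by omega)]
    exact Int.mul_ediv_cancel_left _ (by omega)
  rw [hfd]
  have hkodd : ¬ PySem.Int.mod k 2 = 0 := by
    intro hk
    apply h2
    obtain ⟨j, rfl⟩ := dvd_of_mod2 hk
    rw [PySem.Int.mod_eq_emod_of_pos (by omega)]
    omega
  by_cases hk : k < 1
  · rw [zhi_alt_eq, zhi_alt_eq, if_pos (by omega), if_pos (by omega)]
  · have hk2 : 2 ≤ k := by
      rcases lt_or_ge k 2 with h | h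
      · have : k = 1 := by omega
        subst this; simp at hne
      · exact h
    rw [zhi_alt_eq, zhi_alt_eq, if_neg (by omega), if_neg (by omega)]
    rw [stripC_noop 2 _ h2, stripC_noop 2 _ hkodd]
    rw [stripC_step 5 (5 * k) (by omega) hn h5, hfd]

-- R4: if neither 2 nor 5 divides n, B answers false
theorem alt_stuck (n : Int) (h2 : ¬ PySem.Int.mod n 2 = 0) (h5 : ¬ PySem.Int.mod n 5 = 0) :
    zhi_alt n = false := by
  rw [zhi_alt_eq]
  by_cases hlt : n < 2
  · simp [hlt]
  · rw [if_neg hlt, stripC_noop 2 _ h2, stripC_noop 5 _ h5]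
    simp; omega

theorem zhi_main : ∀ f n, n ≠ 0 → n.natAbs ≤ f → zhiF f n = zhi_alt n := by
  intro f
  induction f with
  | zero => intro n hn h; omega
  | succ f ih =>
    intro n hn hf
    show (if n = 2 ∨ n = 5 then true
      else if PySem.Int.mod n 2 = 0 then zhiF f (PySem.Int.floordiv n 2)
      else if PySem.Int.mod n 5 = 0 then zhiF f (PySem.Int.floordiv n 5)
      else false) = zhi_alt n
    by_cases hb : n = 2 ∨ n = 5
    · rcases hb with rfl | rfl <;> simp <;> decide
    · push_neg at hb
      rw [if_neg (by tauto)]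
      by_cases h2 : PySem.Int.mod n 2 = 0
      · rw [if_pos h2]
        have hdvd := dvd_of_mod2 h2
        have hfd : PySem.Int.floordiv n 2 = n / 2 :=
          PySem.Int.floordiv_eq_ediv_of_pos (by omega)
        have hlt : (n / 2).natAbs < n.natAbs := natAbs_div_lt 2 n (by omega) hn hdvd
        have hne : n / 2 ≠ 0 := by
          obtain ⟨k, rfl⟩ := hdvd
          rw [Int.mul_ediv_cancel_left _ (by omega)]
          rintro rfl; simp at hn
        rw [hfd, ih (n / 2) hne (by omega), ← hfd, ← alt_step2 n hn h2 hb.1]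
      · rw [if_neg h2]
        by_cases h5 : PySem.Int.mod n 5 = 0
        · rw [if_pos h5]
          have hdvd := dvd_of_mod5 h5
          have hfd : PySem.Int.floordiv n 5 = n / 5 :=
            PySem.Int.floordiv_eq_ediv_of_pos (by omega)
          have hlt : (n / 5).natAbs < n.natAbs := natAbs_div_lt 5 n (by omega) hn hdvd
          have hne : n / 5 ≠ 0 := by
            obtain ⟨k, rfl⟩ := hdvd
            rw [Int.mul_ediv_cancel_left _ (by omega)]
            rintro rfl; simp at hn
          rw [hfd, ih (n / 5) hne (by omega), ← hfd, ← alt_step5 n hn h2 h5 hb.2]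
        · rw [if_neg h5, alt_stuck n h2 h5]

-- ===== VERDICT (by name: the statement is the Claim_ definition above) =====
theorem zhi_spec : Claim_equal_zhi := by
  intro n _ hpre
  show zhi n = zhi_alt n
  exact zhi_main (n.natAbs + 1) n hpre (by omega)
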